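-- pv_equiv track=rewrite | github.com/mislusnys/matasano | python3/set1/ch8.py | calc_blocks_in_line
-- ===== SOURCE A (Python) =====
-- import itertools
--
-- def calc_blocks_in_line(line):
--     # 16 byte blocks, 32 chars
--     blocks = [line[i:i+32] for i in range(0, len(line), 32)]
--     pairs = itertools.combinations(blocks, 2)
--     same = 0
--     for p in pairs:
--         if p[0] == p[1]:
--             same += 1
--     return same
-- ===== SOURCE B (Python) =====
-- def calc_blocks_in_line(line):
--     blocks = [line[i:i+32] for i in range(0, len(line), 32)]
--     counts = {}
--     for b in blocks:
--         counts[b] = counts.get(b, 0) + 1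
--     return sum(c * (c - 1) // 2 for c in counts.values())
-- ===== Notes on version B (the rewrite author's own statement) =====
-- stated objective: faster
-- what changed: Replaces the all-pairs scan over itertools.combinations with a single counting pass (dict of block multiplicities) and the closed form c*(c-1)//2 per distinct block.
import Mathlib
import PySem

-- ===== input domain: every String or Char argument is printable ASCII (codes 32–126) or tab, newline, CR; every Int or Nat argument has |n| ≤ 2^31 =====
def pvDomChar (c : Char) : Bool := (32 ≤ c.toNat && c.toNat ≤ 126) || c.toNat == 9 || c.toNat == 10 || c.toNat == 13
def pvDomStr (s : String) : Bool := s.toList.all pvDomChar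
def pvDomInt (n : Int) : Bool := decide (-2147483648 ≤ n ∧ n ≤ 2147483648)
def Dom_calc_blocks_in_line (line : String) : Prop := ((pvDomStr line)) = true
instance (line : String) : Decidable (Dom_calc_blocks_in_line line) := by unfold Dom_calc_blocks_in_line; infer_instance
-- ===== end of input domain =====

-- B replaces A's all-pairs scan over itertools.combinations with a single counting pass
-- (a dict of block multiplicities) plus the closed form c*(c-1)//2 per distinct block (objective: faster).

-- ===== PORT A =====
-- A: blocks = [line[i:i+32] for i in range(0, len(line), 32)]; loop over itertools.combinations(blocks, 2)
-- counting p[0] == p[1].  combinations(blocks, 2) is PySem.List.combinations blocks 2 (each element a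
-- 2-element list; the match on [a, b] is the tuple access p[0], p[1]).
def calc_blocks_in_line (line : String) : Int :=
  let blocks := (PySem.List.pyRange 0 (PySem.Str.len line) 32).map
    (fun i => PySem.Str.slice line (some i) (some (i + 32)))
  let pairs := PySem.List.combinations blocks 2
  pairs.foldl (fun same p =>
    match p with
    | [a, b] => if a = b then same + 1 else same
    | _ => same) 0

-- ===== PORT B =====
-- B: the same block list, then a dict-counting loop 'counts[b] = counts.get(b, 0) + 1' and
-- sum(c * (c - 1) // 2 for c in counts.values()).
def calc_blocks_in_line_alt (line : String) : Int :=
  let blocks := (PySem.List.pyRange 0 (PySem.Str.len line) 32).map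
    (fun i => PySem.Str.slice line (some i) (some (i + 32)))
  let counts := blocks.foldl (fun d b => d.insert b (d.getD b 0 + 1)) PySem.Dict.empty
  (counts.values.map (fun c => PySem.Int.floordiv (c * (c - 1)) 2)).sum

-- ===== PRECONDITION & SPEC =====
def Spec_calc_blocks_in_line (line : String) (out : Int) : Prop := out = calc_blocks_in_line_alt line
instance (line : String) (out : Int) : Decidable (Spec_calc_blocks_in_line line out) := by unfold Spec_calc_blocks_in_line; infer_instance

-- ===== CLAIM (what is proved, stated in full; the proofs are below) =====
def Claim_equal_calc_blocks_in_line : Prop := ∀ (line : String), Dom_calc_blocks_in_line line → Spec_calc_blocks_in_line line (calc_blocks_in_line line)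

-- ===== LEMMAS AND PROOFS =====

-- pcPairs l = number of index-ordered pairs (i < j) with l[i] = l[j]
def pcPairs (l : List String) : Nat :=
  match l with
  | [] => 0
  | x :: xs => xs.count x + pcPairs xs

-- A's fold over combinations(l, 2) computes pcPairs l
lemma foldA_eq_pcPairs (l : List String) (s : Int) :
    (PySem.List.combinations l 2).foldl (fun same p =>
      match p with
      | [a, b] => if a = b then same + 1 else same
      | _ => same) s = s + pcPairs l := by
  induction l generalizing s with
  | nil => simp [PySem.List.combinations_eq_nil_of_length_lt, pcPairs]
  | cons x xs ih =>
      rw [PySem.List.combinations_cons_succ, PySem.List.combinations_one,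
        List.foldl_append, List.map_map, List.foldl_map]
      have h1 : xs.foldl (fun same y =>
            (fun (same : Int) p =>
              match p with
              | [a, b] => if a = b then same + 1 else same
              | _ => same) same ((x :: ·) ∘ (fun y => [y]) <| y)) s
          = s + (xs.count x : Int) := by
        have heq : (fun (same : Int) y =>
            (fun (same : Int) p =>
              match p with
              | [a, b] => if a = b then same + 1 else same
              | _ => same) same ((x :: ·) ∘ (fun y => [y]) <| y))
            = fun (same : Int) y => if x = y then same + 1 else same := rfl
        rw [heq, PySem.List.foldl_ite_add_one (fun y => x = y) xs s]
        congr 1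
        rw [List.count_eq_countP]
        exact_mod_cast congrArg Nat.cast (List.countP_congr (fun y _ => by
          simp only [decide_eq_true_eq, beq_iff_eq]
          exact eq_comm))
      rw [h1, ih]
      simp only [pcPairs]
      push_cast
      ring

-- C(c+1, 2) = c + C(c, 2), stated on the n*(n-1)/2 closed form
lemma g_succ (c : Nat) : (c + 1) * c / 2 = c + c * (c - 1) / 2 := by
  have h1 : (c + 1) * c / 2 = (c + 1).choose 2 := by simp [Nat.choose_two_right]
  have h2 : c * (c - 1) / 2 = c.choose 2 := by simp [Nat.choose_two_right]
  rw [h1, h2, Nat.choose_succ_succ, Nat.choose_one_right]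

-- the pair count is the sum of C(count, 2) over the distinct elements
lemma pcPairs_eq_sum (l : List String) :
    pcPairs l = ∑ k ∈ l.toFinset, l.count k * (l.count k - 1) / 2 := by
  induction l with
  | nil => simp [pcPairs]
  | cons x xs ih =>
      simp only [pcPairs, List.toFinset_cons]
      by_cases hx : x ∈ xs
      · have hxm : x ∈ xs.toFinset := List.mem_toFinset.mpr hx
        have hins : insert x xs.toFinset = xs.toFinset := Finset.insert_eq_self.mpr hxm
        have hcx : (x :: xs).count x = xs.count x + 1 := by simp
        have hE : ∑ k ∈ xs.toFinset.erase x,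
            (x :: xs).count k * ((x :: xs).count k - 1) / 2
            = ∑ k ∈ xs.toFinset.erase x, xs.count k * (xs.count k - 1) / 2 := by
          apply Finset.sum_congr rfl
          intro k hk
          have hne : x ≠ k := fun h => (Finset.mem_erase.mp hk).1 h.symm
          simp [hne]
        rw [hins, ← Finset.add_sum_erase _ _ hxm, hE, ih,
          ← Finset.add_sum_erase _ _ hxm, hcx]
        have := g_succ (xs.count x)
        simp only [Nat.add_sub_cancel] at *
        omega
      · have hxm : x ∉ xs.toFinset := fun h => hx (List.mem_toFinset.mp h)
        have hcx : (x :: xs).count x = 1 := by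
          simp [List.count_eq_zero_of_not_mem hx]
        have hE : ∑ k ∈ xs.toFinset,
            (x :: xs).count k * ((x :: xs).count k - 1) / 2
            = ∑ k ∈ xs.toFinset, xs.count k * (xs.count k - 1) / 2 := by
          apply Finset.sum_congr rfl
          intro k hk
          have hne : x ≠ k := fun h => hxm (h ▸ hk)
          simp [hne]
        rw [Finset.sum_insert hxm, hE, hcx, ih,
          List.count_eq_zero_of_not_mem hx]

-- Python's n*(n-1)//2 on a nonnegative count is the Nat closed form
lemma floordiv_choose (n : Nat) :
    PySem.Int.floordiv ((n : Int) * ((n : Int) - 1)) 2 = ((n * (n - 1) / 2 : Nat) : Int) := by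
  cases n with
  | zero => decide
  | succ m =>
      have h : ((m + 1 : Nat) : Int) * (((m + 1 : Nat) : Int) - 1)
          = (((m + 1) * m : Nat) : Int) := by push_cast; ring
      rw [h]
      simpa using PySem.Int.floordiv_natCast ((m + 1) * m) 2

-- B's counter-and-sum equals the sum of C(count, 2) over the distinct elements
lemma altB_eq_sum (blocks : List String) :
    (((blocks.foldl (fun d b => d.insert b (d.getD b 0 + 1)) PySem.Dict.empty).values).map
        (fun c => PySem.Int.floordiv (c * (c - 1)) 2)).sum
      = ((∑ k ∈ blocks.toFinset, blocks.count k * (blocks.count k - 1) / 2 : Nat) : Int) := by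
  rw [PySem.Dict.foldl_insert_getD_add_one_eq_counter]
  have hv : (PySem.Dict.counter blocks).values
      = (PySem.Set.ofList blocks).map (fun k => ((blocks.count k : Nat) : Int)) := by
    show ((PySem.Dict.counter blocks).items).map Prod.snd = _
    rw [PySem.Dict.items_counter, List.map_map]
    rfl
  rw [hv, List.map_map]
  have hmap : ((PySem.Set.ofList blocks).map
      ((fun c => PySem.Int.floordiv (c * (c - 1)) 2) ∘ fun k => ((blocks.count k : Nat) : Int)))
      = (PySem.Set.ofList blocks).map
        (fun k => ((blocks.count k * (blocks.count k - 1) / 2 : Nat) : Int)) := by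
    apply List.map_congr_left
    intro k _
    exact floordiv_choose (blocks.count k)
  rw [hmap, ← List.sum_toFinset _ (PySem.Set.nodup_ofList blocks)]
  have hfin : (PySem.Set.ofList blocks).toFinset = blocks.toFinset := by
    apply Finset.ext
    intro k
    simp [PySem.Set.mem_ofList]
  rw [hfin]
  push_cast
  rfl

-- ===== VERDICT (by name: the statement is the Claim_ definition above) =====
theorem calc_blocks_in_line_spec : Claim_equal_calc_blocks_in_line := by
  intro line _
  have key : ∀ blocks : List String,
      (PySem.List.combinations blocks 2).foldl (fun same p =>
        match p with
        | [a, b] => if a = b then same + 1 else same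
        | _ => same) 0
      = (((blocks.foldl (fun d b => d.insert b (d.getD b 0 + 1)) PySem.Dict.empty).values).map
          (fun c => PySem.Int.floordiv (c * (c - 1)) 2)).sum := by
    intro blocks
    rw [foldA_eq_pcPairs, altB_eq_sum, pcPairs_eq_sum]
    simp
  exact key _
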